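-- pv_equiv track=rewrite | github.com/CodingTestKiller/Season3 | 8주차/디펜스게임/masonkimseoul.py | solution
-- ===== SOURCE A (Python) =====
-- import heapq
--
-- def solution(n, k, enemy):
--     if len(enemy) <= k:
--         return len(enemy)
--
--     i = k
--     heap = enemy[:k]
--     heapq.heapify(heap)
--     while n >= 0 and i < len(enemy):
--         heapq.heappush(heap, enemy[i])
--         n -= heapq.heappop(heap)
--         i += 1
--
--     if i == len(enemy) and n >= 0:
--         i += 1
--
--     return i - 1
-- ===== SOURCE B (Python) =====
-- def solution(n, k, enemy):
--     if len(enemy) <= k: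
--         return len(enemy)
--     for m in range(k, len(enemy) + 1):
--         if sum(sorted(enemy[:m])[:m - k]) > n:
--             return m - 1
--     return len(enemy)
-- ===== Notes on version B (the rewrite author's own statement) =====
-- stated objective: alternative
-- what changed: Replaces the stateful heap simulation (running soldier count, heapify/push/pop) by a stateless scan that recomputes each round's cost in closed form as the sum of the m-k smallest of the first m enemies via sorting, returning just before the first round whose cost exceeds n.
-- outside the precondition, e.g. on solution(0, -1, [1, 2]): A returns -1, B returns 0
import Mathlib
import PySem

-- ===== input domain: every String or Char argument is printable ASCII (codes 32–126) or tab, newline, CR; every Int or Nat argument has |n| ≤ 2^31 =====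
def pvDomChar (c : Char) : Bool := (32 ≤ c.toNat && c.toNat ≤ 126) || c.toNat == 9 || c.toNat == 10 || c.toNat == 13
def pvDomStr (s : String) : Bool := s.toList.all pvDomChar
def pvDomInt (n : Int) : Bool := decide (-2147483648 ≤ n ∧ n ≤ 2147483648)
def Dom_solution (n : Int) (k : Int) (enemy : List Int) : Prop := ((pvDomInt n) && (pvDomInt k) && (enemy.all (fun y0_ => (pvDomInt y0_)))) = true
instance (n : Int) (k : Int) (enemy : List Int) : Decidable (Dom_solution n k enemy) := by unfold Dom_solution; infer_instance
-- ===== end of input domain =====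

-- B replaces A's stateful heap simulation by a stateless per-round closed-form cost scan
-- (objective: alternative decomposition, not speed). Return value only; no arguments are mutated.

-- ===== PORT A =====
-- heapq is modelled by its priority-queue contract: the heap is the multiset of its elements,
-- heappush appends, heappop removes and returns the minimum — exact for the values A observes.
def minval (l : List Int) : Int := (PySem.List.min? l (fun y => y)).getD 0

def solutionLoopA (n : Int) (heap : List Int) (rest : List Int) (i : Int) : Int :=
  match rest with
  | [] => if 0 ≤ n then (i + 1) - 1 else i - 1
  | x :: rs =>
    if 0 ≤ n then
      solutionLoopA (n - minval (heap ++ [x])) ((heap ++ [x]).erase (minval (heap ++ [x]))) rs (i + 1)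
    else i - 1

def solution (n : Int) (k : Int) (enemy : List Int) : Int :=
  if (enemy.length : Int) ≤ k then (enemy.length : Int)
  else
    solutionLoopA n (PySem.List.slice enemy none (some k)) (PySem.List.slice enemy (some k) none) k

-- ===== PORT B =====
-- cost of surviving m rounds: sum(sorted(enemy[:m])[:m - k])
def costB (k : Int) (enemy : List Int) (m : Int) : Int :=
  (PySem.List.slice (PySem.List.sorted (PySem.List.slice enemy none (some m)) (fun y => y) false) none (some (m - k))).sum

def solutionAltLoop (n : Int) (k : Int) (enemy : List Int) (ms : List Int) : Int :=
  match ms with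
  | [] => (enemy.length : Int)
  | m :: ms' => if costB k enemy m > n then m - 1 else solutionAltLoop n k enemy ms'

def solution_alt (n : Int) (k : Int) (enemy : List Int) : Int :=
  if (enemy.length : Int) ≤ k then (enemy.length : Int)
  else solutionAltLoop n k enemy (PySem.List.pyRange k ((enemy.length : Int) + 1) 1)

-- ===== PRECONDITION & SPEC =====
-- Pre_ excludes negative k (a negative number of abilities, outside the task's natural domain):
-- there A's value comes from Python's negative-slice/negative-index accidents, which B does not mimic.
def Pre_solution (n : Int) (k : Int) (enemy : List Int) : Prop := 0 ≤ k
instance (n : Int) (k : Int) (enemy : List Int) : Decidable (Pre_solution n k enemy) := by unfold Pre_solution; infer_instance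
def pvWitness_solution : Int × Int × List Int := (10, 2, [3, 5, 1, 2, 6])

def Spec_solution (n : Int) (k : Int) (enemy : List Int) (out : Int) : Prop := out = solution_alt n k enemy
instance (n : Int) (k : Int) (enemy : List Int) (out : Int) : Decidable (Spec_solution n k enemy out) := by unfold Spec_solution; infer_instance

-- ===== CLAIM (what is proved, stated in full; the proofs are below) =====
def Claim_equal_solution : Prop := ∀ (n : Int) (k : Int) (enemy : List Int), Dom_solution n k enemy → Pre_solution n k enemy → Spec_solution n k enemy (solution n k enemy)

-- ===== LEMMAS AND PROOFS =====

lemma minval_spec (l : List Int) (h : l ≠ []) : minval l ∈ l ∧ ∀ y ∈ l, minval l ≤ y := by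
  unfold minval
  cases hm : PySem.List.min? l (fun y => y) with
  | none => exact absurd ((PySem.List.min?_eq_none_iff l (fun y => y)).mp hm) h
  | some m => simpa using ⟨PySem.List.min?_mem hm, PySem.List.min?_isMin hm⟩

lemma minval_eq_of (l : List Int) (a : Int) (ha : a ∈ l) (hle : ∀ y ∈ l, a ≤ y) : minval l = a := by
  have hne : l ≠ [] := by intro h; simp [h] at ha
  obtain ⟨hm, hmin⟩ := minval_spec l hne
  exact le_antisymm (hmin a ha) (hle _ hm)

lemma minval_perm {l1 l2 : List Int} (h : l1.Perm l2) (hne : l1 ≠ []) : minval l1 = minval l2 := by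
  have hne2 : l2 ≠ [] := by intro h2; subst h2; exact hne h.eq_nil
  obtain ⟨hm2, hmin2⟩ := minval_spec l2 hne2
  exact minval_eq_of l1 (minval l2) (h.mem_iff.mpr hm2) (fun y hy => hmin2 y (h.mem_iff.mp hy))

-- the one-step fact about sorted lists: inserting x and evicting the minimum of the top part
lemma key_step (S : List Int) (x : Int) (j : Nat)
    (hs : S.Pairwise (· ≤ ·)) (hj : j ≤ S.length) :
    ((S.drop j ++ [x]).erase (minval (S.drop j ++ [x]))).Perm
      ((List.orderedInsert (· ≤ ·) x S).drop (j + 1)) ∧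
    ((List.orderedInsert (· ≤ ·) x S).take (j + 1)).sum
      = (S.take j).sum + minval (S.drop j ++ [x]) := by
  induction S generalizing j with
  | nil =>
    have hj0 : j = 0 := by simpa using hj
    subst hj0
    simp [List.orderedInsert, minval, PySem.List.min?]
  | cons s S' ih =>
    rcases List.pairwise_cons.mp hs with ⟨hsle, hs'⟩
    cases j with
    | zero =>
      simp only [List.drop_zero, List.take_zero, List.sum_nil, zero_add]
      by_cases hxs : x ≤ s
      · have hIns : List.orderedInsert (· ≤ ·) x (s :: S') = x :: s :: S' := by
          simp [List.orderedInsert, hxs]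
        have hmv : minval ((s :: S') ++ [x]) = x := by
          apply minval_eq_of
          · simp
          · intro y hy
            rcases (by simpa using hy : y = s ∨ y ∈ S' ∨ y = x) with h | h | h
            · omega
            · exact le_trans hxs (hsle y h)
            · omega
        rw [hmv, hIns]
        refine ⟨?_, by simp⟩
        exact ((List.perm_append_singleton x (s :: S')).erase x).trans (by simp)
      · have hIns : List.orderedInsert (· ≤ ·) x (s :: S') = s :: List.orderedInsert (· ≤ ·) x S' := by
          simp [List.orderedInsert, hxs]
        have hmv : minval ((s :: S') ++ [x]) = s := by
          apply minval_eq_of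
          · simp
          · intro y hy
            rcases (by simpa using hy : y = s ∨ y ∈ S' ∨ y = x) with h | h | h
            · omega
            · exact hsle y h
            · omega
        rw [hmv, hIns]
        constructor
        · simp only [List.cons_append, List.erase_cons_head, List.drop_succ_cons, List.drop_zero]
          exact ((List.perm_orderedInsert _ x S').trans (List.perm_append_singleton x S').symm).symm
        · simp
    | succ j' =>
      have hj' : j' ≤ S'.length := by simpa using hj
      rw [List.drop_succ_cons]
      by_cases hxs : x ≤ s
      · have hIns : List.orderedInsert (· ≤ ·) x (s :: S') = x :: s :: S' := by
          simp [List.orderedInsert, hxs]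
        have hall : ∀ y ∈ S'.drop j', x ≤ y := fun y hy =>
          le_trans hxs (hsle y (List.mem_of_mem_drop hy))
        have hmv : minval (S'.drop j' ++ [x]) = x := by
          apply minval_eq_of
          · simp
          · intro y hy
            rcases List.mem_append.mp hy with h | h
            · exact hall y h
            · simp at h; omega
        rw [hmv, hIns]
        constructor
        · have h1 : (x :: s :: S').drop (j' + 1 + 1) = S'.drop j' := by simp
          rw [h1]
          exact ((List.perm_append_singleton x (S'.drop j')).erase x).trans (by simp)
        · simp only [List.take_succ_cons, List.sum_cons]
          omega
      · have hIns : List.orderedInsert (· ≤ ·) x (s :: S') = s :: List.orderedInsert (· ≤ ·) x S' := by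
          simp [List.orderedInsert, hxs]
        rcases ih j' hs' hj' with ⟨hperm, hsum⟩
        rw [hIns]
        constructor
        · simpa only [List.drop_succ_cons] using hperm
        · simp only [List.take_succ_cons, List.sum_cons, hsum]
          omega

lemma costB_prefix (k : Int) (hk : 0 ≤ k) (pre rest : List Int) (hkp : k.toNat ≤ pre.length) :
    costB k (pre ++ rest) (pre.length : Int)
      = ((PySem.List.sorted pre (fun y => y) false).take (pre.length - k.toNat)).sum := by
  unfold costB
  have e1 : PySem.List.slice (pre ++ rest) none (some ((pre.length : Int)))
      = (pre ++ rest).take ((pre.length : Int)).toNat :=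
    PySem.List.slice_to _ (by positivity)
  have h1 : ((pre.length : Int)).toNat = pre.length := by omega
  rw [e1, h1, List.take_left]
  have e2 : PySem.List.slice (PySem.List.sorted pre (fun y => y) false) none
        (some ((pre.length : Int) - k))
      = (PySem.List.sorted pre (fun y => y) false).take (((pre.length : Int) - k)).toNat :=
    PySem.List.slice_to _ (by omega)
  rw [e2, show (((pre.length : Int) - k)).toNat = pre.length - k.toNat by omega]

lemma loopA_eq_loopB (k : Int) (hk : 0 ≤ k) (n0 : Int) :
    ∀ (rest pre heap : List Int),
      k.toNat ≤ pre.length →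
      heap.Perm ((PySem.List.sorted pre (fun y => y) false).drop (pre.length - k.toNat)) →
      solutionLoopA (n0 - ((PySem.List.sorted pre (fun y => y) false).take (pre.length - k.toNat)).sum)
          heap rest (pre.length : Int)
        = solutionAltLoop n0 k (pre ++ rest)
            (PySem.List.pyRange (pre.length : Int) (((pre ++ rest).length : Int) + 1) 1) := by
  intro rest
  induction rest with
  | nil =>
    intro pre heap hkp _
    rw [List.append_nil, PySem.List.pyRange_one_singleton]
    rw [show solutionAltLoop n0 k pre [(pre.length : Int)]
        = if costB k pre (pre.length : Int) > n0 then (pre.length : Int) - 1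
          else (pre.length : Int) from rfl]
    rw [show costB k pre (pre.length : Int)
        = ((PySem.List.sorted pre (fun y => y) false).take (pre.length - k.toNat)).sum from by
      simpa using costB_prefix k hk pre [] hkp]
    unfold solutionLoopA
    split_ifs <;> omega
  | cons x rs ih =>
    intro pre heap hkp hperm
    have hrange : PySem.List.pyRange (pre.length : Int) (((pre ++ x :: rs).length : Int) + 1) 1
        = (pre.length : Int)
          :: PySem.List.pyRange ((pre.length : Int) + 1) (((pre ++ x :: rs).length : Int) + 1) 1 := by
      apply PySem.List.pyRange_one_cons
      simp
      omega
    rw [hrange]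
    rw [show solutionAltLoop n0 k (pre ++ x :: rs)
          ((pre.length : Int)
            :: PySem.List.pyRange ((pre.length : Int) + 1) (((pre ++ x :: rs).length : Int) + 1) 1)
        = if costB k (pre ++ x :: rs) (pre.length : Int) > n0 then (pre.length : Int) - 1
          else solutionAltLoop n0 k (pre ++ x :: rs)
            (PySem.List.pyRange ((pre.length : Int) + 1) (((pre ++ x :: rs).length : Int) + 1) 1) from rfl]
    rw [costB_prefix k hk pre (x :: rs) hkp]
    set S := PySem.List.sorted pre (fun y => y) false with hS
    have hSlen : S.length = pre.length := PySem.List.length_sorted pre (fun y => y) false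
    set j : Nat := pre.length - k.toNat with hj
    unfold solutionLoopA
    by_cases hcond : 0 ≤ n0 - (S.take j).sum
    · rw [if_pos hcond, if_neg (by omega)]
      have hSsort : S.Pairwise (· ≤ ·) := PySem.List.sorted_pairwise pre (fun y => y)
      have hjle : j ≤ S.length := by omega
      obtain ⟨hkey1, hkey2⟩ := key_step S x j hSsort hjle
      have hSperm : S.Perm pre := PySem.List.sorted_perm pre (fun y => y) false
      set I := List.orderedInsert (· ≤ ·) x S with hI
      have hI_eq : PySem.List.sorted (pre ++ [x]) (fun y => y) false = I := by
        apply PySem.List.sorted_id_eq_of_perm_of_pairwise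
        · exact (List.perm_orderedInsert _ x S).trans
            ((hSperm.cons x).trans (List.perm_append_singleton x pre).symm)
        · exact List.Pairwise.orderedInsert x S hSsort
      have hmv : minval (heap ++ [x]) = minval (S.drop j ++ [x]) :=
        minval_perm (hperm.append_right [x]) (by simp)
      have hstep := ih (pre ++ [x]) ((heap ++ [x]).erase (minval (heap ++ [x])))
        (by simp; omega)
        (by rw [hI_eq, show (pre ++ [x]).length - k.toNat = j + 1 from by simp; omega, hmv]
            exact ((hperm.append_right [x]).erase _).trans hkey1)
      rw [show (pre ++ [x]) ++ rs = pre ++ x :: rs from by simp,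
          show (pre ++ [x]).length = pre.length + 1 from by simp,
          show ((pre.length + 1 : Nat) : Int) = (pre.length : Int) + 1 from by push_cast; ring,
          show pre.length + 1 - k.toNat = j + 1 from by omega,
          hI_eq, hkey2, ← hmv] at hstep
      rw [sub_sub]
      exact hstep
    · rw [if_neg hcond, if_pos (by omega)]

lemma solution_eq_alt (n k : Int) (enemy : List Int) (hk : 0 ≤ k) :
    solution n k enemy = solution_alt n k enemy := by
  unfold solution solution_alt
  by_cases hg : (enemy.length : Int) ≤ k
  · rw [if_pos hg, if_pos hg]
  · rw [if_neg hg, if_neg hg]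
    have hkl : k.toNat ≤ enemy.length := by omega
    have hpre : PySem.List.slice enemy none (some k) = enemy.take k.toNat :=
      PySem.List.slice_to enemy hk
    have hrest : PySem.List.slice enemy (some k) none = enemy.drop k.toNat :=
      PySem.List.slice_from enemy hk
    have hlen : (enemy.take k.toNat).length = k.toNat := by
      simp [List.length_take]; omega
    have h0 : (enemy.take k.toNat).length - k.toNat = 0 := by omega
    have hmain := loopA_eq_loopB k hk n (enemy.drop k.toNat) (enemy.take k.toNat) (enemy.take k.toNat)
      (by omega)
      (by rw [h0, List.drop_zero]; exact (PySem.List.sorted_perm _ (fun y => y) false).symm)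
    rw [h0, List.take_zero, List.sum_nil, sub_zero, List.take_append_drop, hlen,
        show ((k.toNat : Nat) : Int) = k from by omega] at hmain
    rw [hpre, hrest]
    exact hmain

-- ===== VERDICT (by name: the statement is the Claim_ definition above) =====
theorem solution_spec : Claim_equal_solution := by
  intro n k enemy _ hk
  unfold Spec_solution
  exact solution_eq_alt n k enemy hk
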